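-- pv_equiv track=rewrite | github.com/DVampire/LeetCodePro | 3710.maximum-partition-factor.py | maxPartitionFactor
-- ===== SOURCE A (Python) =====
-- from typing import List
--
-- def maxPartitionFactor(points: List[List[int]]) -> int:
--     n = len(points)
--     if n == 2:
--         return 0
--     # compute all pairwise Manhattan distances
--     distances = []
--     for i in range(n):
--         for j in range(i+1, n):
--             d = abs(points[i][0] - points[j][0]) + abs(points[i][1] - points[j][1])
--             distances.append((d, i, j))
--     # sort distances descending
--     distances.sort(reverse=True, key=lambda x: x[0])
--     # we need to find the maximum d such that we can split points into two groups where every pair with distance >= d can be placed in same group without violating the condition that the minimum intra-group distance is at least d.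
--     # Actually we want to maximize the minimum intra-group distance. This is similar to the problem of maximizing the minimum edge weight in a partition of vertices into two groups.
--     # This can be solved by binary search on answer d.
--     # For a candidate d, we need to check if we can partition points into two groups such that all intra-group pairs have distance >= d.
--     # That is equivalent to checking if the graph with edges only for pairs with distance < d is bipartite? Wait: We want each group to have all pairs within group with distance >= d. So if two points have distance < d, they cannot be in the same group. Therefore they must be placed in different groups. So we can think of a graph where edges connect points that are too close (distance < d). Then we need to color the graph with two colors (i.e., bipartite) such that adjacent vertices are in different groups. If it's bipartite, then we have a valid partition. However, there might be multiple connected components; as long as each component is bipartite, we can assign colors consistently across components arbitrarily (since components are independent). But note: we require exactly two non-empty groups. That means after coloring, each color set must be non-empty. If the graph is bipartite and has at least one edge, then both color sets are non-empty. But if the graph has no edges (i.e., all distances >= d), then we can arbitrarily split points into two non-empty groups as long as both groups are non-empty; but we must ensure both groups are non-empty. Since n>=2, we can always put at least one point in each group.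
--     # However there is nuance: if graph has isolated vertices (no constraints), they can be placed arbitrarily. We just need to ensure that after coloring we don't end up with one color empty. But since we can assign isolated vertices arbitrarily, we can always make both groups non-empty unless n==1 which is not possible.
--     # So condition reduces to: graph G_d (edges for pairs with distance < d) is bipartite.
--     # Then maximum d such that G_d is bipartite.
--     # We binary search over possible distances.
--     # Precompute all distances and sort unique distances.
--     unique_dists = sorted(set(d for d, _, _ in distances))
--     lo = 0
--     hi = len(unique_dists) - 1
--     ans = 0
--     # Also consider possibility that answer could be larger than any existing distance? Actually if all pairs have distance >= some large value D, then G_d for d <= D has no edges, which is bipartite. So maximum possible answer could be infinity? But note partition factor is defined as minimum intra-group distance among all unordered pairs in same group. If there are no intra-group pairs (group size 1), it doesn't contribute. So if we put each point alone? Wait groups must be exactly two non-empty groups. So each group must have at least one point. If one group has size 1 and other has size n-1, then only the larger group contributes pairs. The partition factor is min over intra-group pairs of that larger group.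
--     # Our condition ensures that for candidate d, we can partition such that any pair within same group has distance >= d. So if such partition exists, then partition factor >= d (since actual min intra-group distance might be larger). We want max possible min intra-group distance.
--     # Since distances are finite, answer cannot exceed max pairwise distance? Actually it could be larger than max pairwise distance? No because if you set d > max_pairwise_distance, then there exists no pair with distance >= d, meaning any two points have distance < d; then they cannot be in same group; but you have more than 2 points? For n>2 you cannot assign each point to different groups because only two groups; by pigeonhole principle at least one group will have at least two points which must have distance < d contradicting requirement. So answer cannot exceed max pairwise distance.
--     # Hence binary search over sorted unique distances works.
--
--     def check(d_thresh):
--         # Build graph where edge exists if Manhattan distance < d_thresh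
--         adj = [[] for _ in range(n)]
--         for i in range(n):
--             for j in range(i+1, n):
--                 dist = abs(points[i][0] - points[j][0]) + abs(points[i][1] - points[j][1])
--                 if dist < d_thresh:
--                     adj[i].append(j)
--                     adj[j].append(i)
--         color = [-1]*n  # -1 uncolored, 0 or 1 colors
--         from collections import deque
--         for start in range(n):
--             if color[start]==-1:
--                 q = deque([start])
--                 color[start]=0
--                 while q:
--                     u = q.popleft()
--                     for v in adj[u]:
--                         if color[v]==-1:
--                             color[v]=color[u]^1
--                             q.append(v)
--                         elif color[v]==color[u]:
--                             return False
--         return True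
--
--     # Binary search on answer among sorted unique distances plus maybe 0 and maybe beyond? We'll search over possible values of d.
--     low_val = 0
--     high_val = max(d for d,_ ,_ in distances) + 1  # exclusive upper bound
--     ans = 0
--     while low_val < high_val:
--         mid = (low_val + high_val + 1)//2   # upper mid for maximizing
--         if check(mid):
--             ans = mid
--             low_val = mid   # try larger
--         else:
--             high_val = mid - 1
--     return ans
-- ===== SOURCE B (Python) =====
-- from typing import List
--
-- def maxPartitionFactor(points: List[List[int]]) -> int:
--     n = len(points)
--     if n == 2:
--         return 0
--     edges = []
--     for i in range(n):
--         for j in range(i + 1, n):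
--             d = abs(points[i][0] - points[j][0]) + abs(points[i][1] - points[j][1])
--             edges.append((d, i, j))
--     edges.sort(key=lambda e: e[0])
--     comp = list(range(n))
--     side = [0] * n
--     for d, i, j in edges:
--         if comp[i] != comp[j]:
--             ti, tj = comp[i], comp[j]
--             flip = side[i] ^ side[j] ^ 1
--             for k in range(n):
--                 if comp[k] == tj:
--                     comp[k] = ti
--                     side[k] = side[k] ^ flip
--         elif side[i] == side[j]:
--             return d
--     return 0
-- ===== Notes on version B (the rewrite author's own statement) =====
-- stated objective: faster
-- what changed: Instead of binary-searching the answer and re-running a BFS two-coloring feasibility check per candidate threshold, B sorts the pairwise distances ascending once and scans them through a parity/component merge structure, returning the distance of the first edge that closes an odd cycle.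
import Mathlib
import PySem

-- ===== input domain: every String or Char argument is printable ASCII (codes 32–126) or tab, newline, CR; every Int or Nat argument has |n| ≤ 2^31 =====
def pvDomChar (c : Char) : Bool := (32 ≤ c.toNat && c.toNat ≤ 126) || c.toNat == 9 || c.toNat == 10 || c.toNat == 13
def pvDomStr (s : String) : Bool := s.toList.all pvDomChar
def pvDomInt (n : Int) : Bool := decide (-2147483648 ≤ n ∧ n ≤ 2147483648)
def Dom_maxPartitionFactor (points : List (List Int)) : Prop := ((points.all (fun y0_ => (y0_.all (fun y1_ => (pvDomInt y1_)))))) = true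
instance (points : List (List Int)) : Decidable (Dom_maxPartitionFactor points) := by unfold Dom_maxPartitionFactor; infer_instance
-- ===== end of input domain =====

-- B replaces A's binary search + per-candidate BFS bipartiteness check by one ascending scan
-- of the sorted pairwise distances through a parity/component merge structure (objective: faster).

-- ===== PORT A =====
def pvCoord (points : List (List Int)) (i k : Int) : Int :=
  PySem.List.pyGetD (PySem.List.pyGetD points i []) k 0

def pvDist (points : List (List Int)) (i j : Int) : Int :=
  |pvCoord points i 0 - pvCoord points j 0| + |pvCoord points i 1 - pvCoord points j 1|

def pvDistances (points : List (List Int)) (n : Int) : List (Int × Int × Int) :=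
  (PySem.List.pyRange 0 n 1).foldl (fun acc i =>
    (PySem.List.pyRange (i + 1) n 1).foldl (fun acc2 j =>
      acc2 ++ [(pvDist points i j, i, j)]) acc) []

def pvAdj (points : List (List Int)) (n d : Int) : List (List Int) :=
  (PySem.List.pyRange 0 n 1).foldl (fun adj i =>
    (PySem.List.pyRange (i + 1) n 1).foldl (fun adj2 j =>
      if pvDist points i j < d then
        PySem.List.pySetD
          (PySem.List.pySetD adj2 i (PySem.List.pyGetD adj2 i [] ++ [j]))
          j (PySem.List.pyGetD (PySem.List.pySetD adj2 i (PySem.List.pyGetD adj2 i [] ++ [j])) j [] ++ [i])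
      else adj2) adj)
    ((PySem.List.pyRange 0 n 1).map (fun _ => ([] : List Int)))

-- Python: color[u] ^ 1 is PySem.Int.bxor cu 1 (exact)
def pvNbrs (cu : Int) (vs : List Int) (color q : List Int) : Option (List Int × List Int) :=
  match vs with
  | [] => some (color, q)
  | v :: rest =>
    if PySem.List.pyGetD color v 0 = -1 then
      pvNbrs cu rest (PySem.List.pySetD color v (PySem.Int.bxor cu 1)) (q ++ [v])
    else if PySem.List.pyGetD color v 0 = cu then none
    else pvNbrs cu rest color q

-- Python's `while q` loop; the fuel 2*n+2 is proved sufficient below (measure 2·#uncolored + |q|)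
def pvBFS (adj : List (List Int)) (color q : List Int) : Nat → Option (List Int)
  | 0 => none
  | fuel + 1 =>
    match q with
    | [] => some color
    | u :: rest =>
      match pvNbrs (PySem.List.pyGetD color u 0) (PySem.List.pyGetD adj u []) color rest with
      | none => none
      | some cq => pvBFS adj cq.1 cq.2 fuel

def pvStarts (adj : List (List Int)) (fuel : Nat) (color : List Int) (starts : List Int) : Option (List Int) :=
  match starts with
  | [] => some color
  | s :: ss =>
    if PySem.List.pyGetD color s 0 = -1 then
      match pvBFS adj (PySem.List.pySetD color s 0) [s] fuel with
      | none => none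
      | some c' => pvStarts adj fuel c' ss
    else pvStarts adj fuel color ss

def pvCheck (points : List (List Int)) (n d : Int) : Bool :=
  (pvStarts (pvAdj points n d) (2 * n.toNat + 2) (PySem.List.pyRepeat [-1] n)
    (PySem.List.pyRange 0 n 1)).isSome

def pvBinSearch (points : List (List Int)) (n lo hi ans : Int) : Int :=
  if h : lo < hi then
    if pvCheck points n (PySem.Int.floordiv (lo + hi + 1) 2) then
      pvBinSearch points n (PySem.Int.floordiv (lo + hi + 1) 2) hi (PySem.Int.floordiv (lo + hi + 1) 2)
    else
      pvBinSearch points n lo (PySem.Int.floordiv (lo + hi + 1) 2 - 1) ans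
  else ans
termination_by (hi - lo).toNat
decreasing_by
  · have h2 := PySem.Int.floordiv_two_mid_bounds (lo := lo + 1) (hi := hi) (by omega)
    have h3 : lo + 1 + hi = lo + hi + 1 := by ring
    rw [h3] at h2
    omega
  · have h2 := PySem.Int.floordiv_two_mid_bounds (lo := lo + 1) (hi := hi) (by omega)
    have h3 : lo + 1 + hi = lo + hi + 1 := by ring
    rw [h3] at h2
    omega

def maxPartitionFactor (points : List (List Int)) : Int :=
  let n : Int := points.length
  if n = 2 then 0
  else
    let distances := PySem.List.sorted (pvDistances points n) (fun x => x.1) true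
    let unique_dists :=
      PySem.List.sorted (PySem.Set.ofList (distances.map (fun x => x.1))) (fun x => x) false
    let _lo : Int := 0
    let _hi : Int := PySem.List.len unique_dists - 1
    -- max(...) raises ValueError on fewer than 2 points (empty sequence): excluded by Pre_
    let high_val := ((PySem.List.max? (distances.map (fun x => x.1)) (fun x => x)).getD 0) + 1
    pvBinSearch points n 0 high_val 0

-- ===== PORT B =====
def pvRelabel (ti tj flip : Int) (comp side : List Int) (ks : List Int) : List Int × List Int :=
  match ks with
  | [] => (comp, side)
  | k :: rest =>
    if PySem.List.pyGetD comp k 0 = tj then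
      pvRelabel ti tj flip (PySem.List.pySetD comp k ti)
        (PySem.List.pySetD side k (PySem.Int.bxor (PySem.List.pyGetD side k 0) flip)) rest
    else pvRelabel ti tj flip comp side rest

def pvScan (n : Int) (comp side : List Int) : List (Int × Int × Int) → Int
  | [] => 0
  | (d, i, j) :: rest =>
    if PySem.List.pyGetD comp i 0 ≠ PySem.List.pyGetD comp j 0 then
      let cs := pvRelabel (PySem.List.pyGetD comp i 0) (PySem.List.pyGetD comp j 0)
        (PySem.Int.bxor (PySem.Int.bxor (PySem.List.pyGetD side i 0) (PySem.List.pyGetD side j 0)) 1)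
        comp side (PySem.List.pyRange 0 n 1)
      pvScan n cs.1 cs.2 rest
    else if PySem.List.pyGetD side i 0 = PySem.List.pyGetD side j 0 then d
    else pvScan n comp side rest

def maxPartitionFactor_alt (points : List (List Int)) : Int :=
  let n : Int := points.length
  if n = 2 then 0
  else
    let edges := PySem.List.sorted (pvDistances points n) (fun e => e.1) false
    pvScan n (PySem.List.pyRange 0 n 1) (PySem.List.pyRepeat [0] n) edges

-- ===== PRECONDITION & SPEC =====
-- Pre_ excludes inputs where the Python A raises: fewer than 2 points (ValueError from max() of an
-- empty sequence) and 3 or more points of which some has fewer than 2 coordinates (IndexError).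
def Pre_maxPartitionFactor (points : List (List Int)) : Prop :=
  2 ≤ points.length ∧ (points.length = 2 ∨ ∀ p ∈ points, 2 ≤ p.length)
instance (points : List (List Int)) : Decidable (Pre_maxPartitionFactor points) := by
  unfold Pre_maxPartitionFactor; infer_instance

def pvWitness_maxPartitionFactor : List (List Int) := [[0, 0], [0, 3], [4, 0]]

def Spec_maxPartitionFactor (points : List (List Int)) (out : Int) : Prop :=
  out = maxPartitionFactor_alt points
instance (points : List (List Int)) (out : Int) : Decidable (Spec_maxPartitionFactor points out) := by
  unfold Spec_maxPartitionFactor; infer_instance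

-- ===== CLAIM (what is proved, stated in full; the proofs are below) =====
def Claim_equal_maxPartitionFactor : Prop := ∀ (points : List (List Int)), Dom_maxPartitionFactor points → Pre_maxPartitionFactor points → Spec_maxPartitionFactor points (maxPartitionFactor points)

-- ===== LEMMAS AND PROOFS =====

-- shorthand for reading a Python int list at an Int index
def pvAt (xs : List Int) (k : Int) : Int := PySem.List.pyGetD xs k 0

-- the "too close" graph at threshold t
def pvE (points : List (List Int)) (t u v : Int) : Prop :=
  0 ≤ u ∧ u < points.length ∧ 0 ≤ v ∧ v < points.length ∧ u ≠ v ∧ pvDist points u v < t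

def pvBip (points : List (List Int)) (t : Int) : Prop :=
  ∃ c : Int → Bool, ∀ u v, pvE points t u v → c u ≠ c v

-- walks with parity in an abstract symmetric relation
inductive pvWalk (E : Int → Int → Prop) : Int → Int → Bool → Prop
  | nil (u : Int) : pvWalk E u u false
  | cons {u v w : Int} {b : Bool} : E u v → pvWalk E v w b → pvWalk E u w (!b)

theorem pvWalk_mono {E E' : Int → Int → Prop} (h : ∀ u v, E u v → E' u v)
    {u v : Int} {b : Bool} (w : pvWalk E u v b) : pvWalk E' u v b := by
  induction w with
  | nil u => exact pvWalk.nil u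
  | cons e _ ih => exact pvWalk.cons (h _ _ e) ih

theorem pvWalk_append {E : Int → Int → Prop} {u v w : Int} {b b' : Bool}
    (h1 : pvWalk E u v b) (h2 : pvWalk E v w b') : pvWalk E u w (xor b b') := by
  induction h1 with
  | nil u => simpa using h2
  | cons e _ ih =>
    have := pvWalk.cons e (ih h2)
    simpa [Bool.xor_comm, Bool.xor_assoc] using this

theorem pvWalk_symm {E : Int → Int → Prop} (hs : ∀ u v, E u v → E v u)
    {u v : Int} {b : Bool} (w : pvWalk E u v b) : pvWalk E v u b := by
  induction w with
  | nil u => exact pvWalk.nil u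
  | cons e _ ih =>
    have e' : pvWalk E _ _ (!false) := pvWalk.cons (hs _ _ e) (pvWalk.nil _)
    have := pvWalk_append ih e'
    simpa using this

theorem pvWalk_proper {E : Int → Int → Prop} {c : Int → Bool}
    (hc : ∀ u v, E u v → c u ≠ c v) {u v : Int} {b : Bool} (w : pvWalk E u v b) :
    c v = xor b (c u) := by
  induction w with
  | nil u => simp
  | @cons x y z bb e hw ih =>
    have hne := hc _ _ e
    have hxy : c y = !(c x) := by
      cases h1 : c x <;> cases h2 : c y <;> simp_all
    rw [ih, hxy]
    cases bb <;> cases c x <;> simp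

theorem pvNoOddClosed {E : Int → Int → Prop} {c : Int → Bool}
    (hc : ∀ u v, E u v → c u ≠ c v) {u : Int} (w : pvWalk E u u true) : False := by
  have := pvWalk_proper hc w
  cases h : c u <;> simp_all

theorem pvDist_comm (points : List (List Int)) (i j : Int) :
    pvDist points i j = pvDist points j i := by
  unfold pvDist
  rw [abs_sub_comm, abs_sub_comm (pvCoord points i 1)]

theorem pvE_symm (points : List (List Int)) (t u v : Int) (h : pvE points t u v) :
    pvE points t v u := by
  obtain ⟨h1, h2, h3, h4, h5, h6⟩ := h
  exact ⟨h3, h4, h1, h2, fun h => h5 h.symm, by rwa [pvDist_comm]⟩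

theorem pvDist_nonneg (points : List (List Int)) (i j : Int) : 0 ≤ pvDist points i j := by
  unfold pvDist
  positivity

theorem pvBip_zero (points : List (List Int)) (t : Int) (ht : t ≤ 0) : pvBip points t := by
  refine ⟨fun _ => true, fun u v h => absurd h ?_⟩
  intro ⟨_, _, _, _, _, h6⟩
  have := pvDist_nonneg points u v
  omega

theorem pvBip_antitone (points : List (List Int)) {t t' : Int} (h : t ≤ t')
    (hb : pvBip points t') : pvBip points t := by
  obtain ⟨c, hc⟩ := hb
  refine ⟨c, fun u v he => hc u v ?_⟩
  obtain ⟨a1, a2, a3, a4, a5, a6⟩ := he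
  exact ⟨a1, a2, a3, a4, a5, by omega⟩

theorem pvNotBip_all (points : List (List Int)) (t : Int) (hn : 3 ≤ points.length)
    (hall : ∀ u v : Int, 0 ≤ u → u < points.length → 0 ≤ v → v < points.length → u ≠ v →
      pvDist points u v < t) : ¬ pvBip points t := by
  rintro ⟨c, hc⟩
  have hn' : (3 : Int) ≤ points.length := by exact_mod_cast hn
  have h01 := hc 0 1 ⟨by omega, by omega, by omega, by omega, by omega, hall 0 1 (by omega) (by omega) (by omega) (by omega) (by omega)⟩
  have h02 := hc 0 2 ⟨by omega, by omega, by omega, by omega, by omega, hall 0 2 (by omega) (by omega) (by omega) (by omega) (by omega)⟩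
  have h12 := hc 1 2 ⟨by omega, by omega, by omega, by omega, by omega, hall 1 2 (by omega) (by omega) (by omega) (by omega) (by omega)⟩
  cases hb0 : c 0 <;> cases hb1 : c 1 <;> cases hb2 : c 2 <;> simp_all

-- characterization of the generated pair list
theorem pvDistances_eq (points : List (List Int)) (n : Int) :
    pvDistances points n = (PySem.List.pyRange 0 n 1).flatMap
      (fun i => (PySem.List.pyRange (i + 1) n 1).map (fun j => (pvDist points i j, i, j))) := by
  unfold pvDistances
  rw [PySem.List.foldl_congr_mem (PySem.List.pyRange 0 n 1) _
      (fun acc i => acc ++ (PySem.List.pyRange (i + 1) n 1).map (fun j => (pvDist points i j, i, j)))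
      [] (by intro acc x _; exact PySem.List.foldl_append_singleton_eq_map _ _ _)]
  rw [PySem.List.foldl_append_eq_flatMap]
  simp

theorem mem_pvDistances (points : List (List Int)) (n : Int) (e : Int × Int × Int) :
    e ∈ pvDistances points n ↔
      0 ≤ e.2.1 ∧ e.2.1 < e.2.2 ∧ e.2.2 < n ∧ e.1 = pvDist points e.2.1 e.2.2 := by
  obtain ⟨d, i, j⟩ := e
  rw [pvDistances_eq]
  dsimp only
  constructor
  · intro h
    simp only [List.mem_flatMap, List.mem_map, PySem.List.mem_pyRange_one] at h
    obtain ⟨a, ⟨ha0, han⟩, b, ⟨hb, hbn⟩, heq⟩ := h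
    cases heq
    exact ⟨ha0, by omega, hbn, rfl⟩
  · rintro ⟨h1, h2, h3, h4⟩
    simp only [List.mem_flatMap, List.mem_map, PySem.List.mem_pyRange_one]
    exact ⟨i, ⟨h1, by omega⟩, j, ⟨by omega, h3⟩, by rw [h4]⟩


-- generic in-range read/write lemmas
theorem pvGet_set_self {α : Type} (xs : List α) (k : Int) (v dflt : α)
    (h0 : 0 ≤ k) (h1 : k < (xs.length : Int)) :
    PySem.List.pyGetD (PySem.List.pySetD xs k v) k dflt = v := by
  have e : k = ((k.toNat : Nat) : Int) := by omega
  rw [e, PySem.List.pyGetD_pySetD_natCast _ _ _ _ _ (by omega)]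
  simp

theorem pvGet_set_other {α : Type} (xs : List α) (k m : Int) (v dflt : α)
    (h0 : 0 ≤ k) (h1 : k < (xs.length : Int)) (hm : 0 ≤ m) (hne : m ≠ k) :
    PySem.List.pyGetD (PySem.List.pySetD xs k v) m dflt = PySem.List.pyGetD xs m dflt := by
  have ek : k = ((k.toNat : Nat) : Int) := by omega
  have em : m = ((m.toNat : Nat) : Int) := by omega
  rw [ek, em, PySem.List.pyGetD_pySetD_natCast _ _ _ _ _ (by omega)]
  rw [if_neg (by omega)]

theorem pvAt_def (xs : List Int) (k : Int) : pvAt xs k = PySem.List.pyGetD xs k 0 := rfl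

theorem pvAt_set_self (xs : List Int) (k v : Int) (h0 : 0 ≤ k) (h1 : k < (xs.length : Int)) :
    pvAt (PySem.List.pySetD xs k v) k = v := pvGet_set_self xs k v 0 h0 h1

theorem pvAt_set_other (xs : List Int) (k m v : Int) (h0 : 0 ≤ k) (h1 : k < (xs.length : Int))
    (hm : 0 ≤ m) (hne : m ≠ k) : pvAt (PySem.List.pySetD xs k v) m = pvAt xs m :=
  pvGet_set_other xs k m v 0 h0 h1 hm hne

theorem pvAt_pyRange (n k : Int) (h0 : 0 ≤ k) (h1 : k < n) :
    pvAt (PySem.List.pyRange 0 n 1) k = k := by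
  unfold pvAt
  rw [PySem.List.pyRange_one]
  have e : k = ((k.toNat : Nat) : Int) := by omega
  rw [e, PySem.List.pyGetD_natCast, PySem.List.getD_map_range _ _ _ _ (by omega)]
  simp

theorem pvAt_repeat (c n k : Int) (h0 : 0 ≤ k) (h1 : k < n) :
    pvAt (PySem.List.pyRepeat [c] n) k = c := by
  unfold pvAt
  rw [PySem.List.pyRepeat_singleton]
  have e : k = ((k.toNat : Nat) : Int) := by omega
  rw [e, PySem.List.pyGetD_natCast]
  simp [List.getD, List.getElem?_replicate, show k.toNat < n.toNat by omega]

theorem pvBxor01 {a b : Int} (ha : a = 0 ∨ a = 1) (hb : b = 0 ∨ b = 1) :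
    PySem.Int.bxor a b = 0 ∨ PySem.Int.bxor a b = 1 := by
  rcases ha with rfl | rfl <;> rcases hb with rfl | rfl <;> simp [show PySem.Int.bxor 0 0 = 0 from by decide,
    show PySem.Int.bxor 0 1 = 1 from by decide, show PySem.Int.bxor 1 0 = 1 from by decide,
    show PySem.Int.bxor 1 1 = 0 from by decide]

-- edges seen so far, as a symmetric relation
def pvEL (pr : List (Int × Int × Int)) (u v : Int) : Prop :=
  (∃ d, (d, u, v) ∈ pr) ∨ (∃ d, (d, v, u) ∈ pr)

theorem pvEL_symm (pr : List (Int × Int × Int)) (u v : Int) (h : pvEL pr u v) : pvEL pr v u := h.symm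

theorem pvEL_mono {pr pr' : List (Int × Int × Int)} (h : ∀ e ∈ pr, e ∈ pr') (u v : Int)
    (he : pvEL pr u v) : pvEL pr' u v := by
  rcases he with ⟨d, hd⟩ | ⟨d, hd⟩
  · exact Or.inl ⟨d, h _ hd⟩
  · exact Or.inr ⟨d, h _ hd⟩

-- loop invariant of B's merge scan
def pvInvB (points : List (List Int)) (cp sd : List Int) (pr : List (Int × Int × Int)) : Prop :=
  cp.length = points.length ∧ sd.length = points.length ∧
  (∀ k : Int, 0 ≤ k → k < points.length → pvAt sd k = 0 ∨ pvAt sd k = 1) ∧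
  (∀ d i j : Int, (d, i, j) ∈ pr → pvAt cp i = pvAt cp j ∧ pvAt sd i ≠ pvAt sd j) ∧
  (∀ u v : Int, 0 ≤ u → u < points.length → 0 ≤ v → v < points.length →
    pvAt cp u = pvAt cp v → pvWalk (pvEL pr) u v (decide (pvAt sd u ≠ pvAt sd v)))

theorem pvRelabel_spec (ti tj flip : Int) :
    ∀ (ks : List Int), ∀ (cp sd : List Int), ks.Nodup →
      (∀ k ∈ ks, 0 ≤ k ∧ k < (cp.length : Int) ∧ k < (sd.length : Int)) →
      (pvRelabel ti tj flip cp sd ks).1.length = cp.length ∧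
      (pvRelabel ti tj flip cp sd ks).2.length = sd.length ∧
      ∀ m : Int, 0 ≤ m →
        (pvAt (pvRelabel ti tj flip cp sd ks).1 m =
          if m ∈ ks ∧ pvAt cp m = tj then ti else pvAt cp m) ∧
        (pvAt (pvRelabel ti tj flip cp sd ks).2 m =
          if m ∈ ks ∧ pvAt cp m = tj then PySem.Int.bxor (pvAt sd m) flip else pvAt sd m) := by
  intro ks
  induction ks with
  | nil =>
    intro cp sd _ _
    refine ⟨rfl, rfl, fun m hm => ?_⟩
    simp [pvRelabel]
  | cons k rest ih =>
    intro cp sd hnd hbd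
    obtain ⟨hk0, hk1, hk2⟩ := hbd k (by simp)
    have hknr : k ∉ rest := (List.nodup_cons.mp hnd).1
    have hndr : rest.Nodup := (List.nodup_cons.mp hnd).2
    by_cases hck : pvAt cp k = tj
    · have hstep : pvRelabel ti tj flip cp sd (k :: rest) =
          pvRelabel ti tj flip (PySem.List.pySetD cp k ti)
            (PySem.List.pySetD sd k (PySem.Int.bxor (pvAt sd k) flip)) rest := by
        rw [pvRelabel, ← pvAt_def, if_pos hck]
        rfl
      set cp1 := PySem.List.pySetD cp k ti with hcp1
      set sd1 := PySem.List.pySetD sd k (PySem.Int.bxor (pvAt sd k) flip) with hsd1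
      have hlen1 : cp1.length = cp.length := PySem.List.length_pySetD _ _ _
      have hlen2 : sd1.length = sd.length := PySem.List.length_pySetD _ _ _
      obtain ⟨ih1, ih2, ih3⟩ := ih cp1 sd1 hndr (by
        intro x hx
        obtain ⟨a, b, c⟩ := hbd x (by simp [hx])
        exact ⟨a, by omega, by omega⟩)
      rw [hstep]
      refine ⟨by rw [ih1, hlen1], by rw [ih2, hlen2], fun m hm => ?_⟩
      obtain ⟨f1, f2⟩ := ih3 m hm
      by_cases hmk : m = k
      · subst hmk
        have e1 : pvAt cp1 m = ti := pvAt_set_self _ _ _ hk0 hk1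
        have e2 : pvAt sd1 m = PySem.Int.bxor (pvAt sd m) flip := pvAt_set_self _ _ _ hk0 hk2
        rw [f1, f2, e1, e2]
        constructor
        · rw [if_neg (by tauto), if_pos ⟨by simp, hck⟩]
        · rw [if_neg (by tauto), if_pos ⟨by simp, hck⟩]
      · have e1 : pvAt cp1 m = pvAt cp m := pvAt_set_other _ _ _ _ hk0 hk1 hm hmk
        have e2 : pvAt sd1 m = pvAt sd m := pvAt_set_other _ _ _ _ hk0 hk2 hm hmk
        rw [f1, f2, e1, e2]
        have hmem : (m ∈ k :: rest ∧ pvAt cp m = tj) ↔ (m ∈ rest ∧ pvAt cp m = tj) := by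
          simp [List.mem_cons, hmk]
        constructor
        · by_cases hc : m ∈ rest ∧ pvAt cp m = tj
          · rw [if_pos hc, if_pos (hmem.mpr hc)]
          · rw [if_neg hc, if_neg (fun h => hc (hmem.mp h))]
        · by_cases hc : m ∈ rest ∧ pvAt cp m = tj
          · rw [if_pos hc, if_pos (hmem.mpr hc)]
          · rw [if_neg hc, if_neg (fun h => hc (hmem.mp h))]
    · have hstep : pvRelabel ti tj flip cp sd (k :: rest) = pvRelabel ti tj flip cp sd rest := by
        rw [pvRelabel, ← pvAt_def, if_neg hck]
      obtain ⟨ih1, ih2, ih3⟩ := ih cp sd hndr (fun x hx => hbd x (by simp [hx]))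
      rw [hstep]
      refine ⟨ih1, ih2, fun m hm => ?_⟩
      obtain ⟨f1, f2⟩ := ih3 m hm
      by_cases hmk : m = k
      · subst hmk
        rw [f1, f2]
        constructor
        · rw [if_neg (by tauto), if_neg (by tauto)]
        · rw [if_neg (by tauto), if_neg (by tauto)]
      · have hmem : (m ∈ k :: rest ∧ pvAt cp m = tj) ↔ (m ∈ rest ∧ pvAt cp m = tj) := by
          simp [List.mem_cons, hmk]
        rw [f1, f2]
        constructor
        · by_cases hc : m ∈ rest ∧ pvAt cp m = tj
          · rw [if_pos hc, if_pos (hmem.mpr hc)]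
          · rw [if_neg hc, if_neg (fun h => hc (hmem.mp h))]
        · by_cases hc : m ∈ rest ∧ pvAt cp m = tj
          · rw [if_pos hc, if_pos (hmem.mpr hc)]
          · rw [if_neg hc, if_neg (fun h => hc (hmem.mp h))]


theorem pvDecide_ne_comm (a b : Int) : decide (a ≠ b) = decide (b ≠ a) := by
  rcases eq_or_ne a b with rfl | h
  · simp
  · simp [h, h.symm]

theorem pvBxor_cancel_ne {a b f : Int} (ha : a = 0 ∨ a = 1) (hb : b = 0 ∨ b = 1)
    (hf : f = 0 ∨ f = 1) (h : a ≠ b) : PySem.Int.bxor a f ≠ PySem.Int.bxor b f := by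
  rcases ha with rfl | rfl <;> rcases hb with rfl | rfl <;> rcases hf with rfl | rfl <;> first | decide | omega

theorem pvSideNew {si sj : Int} (hi : si = 0 ∨ si = 1) (hj : sj = 0 ∨ sj = 1) :
    si ≠ PySem.Int.bxor sj (PySem.Int.bxor (PySem.Int.bxor si sj) 1) := by
  rcases hi with rfl | rfl <;> rcases hj with rfl | rfl <;> decide

theorem pvParityFlip {su sv f : Int} (hu : su = 0 ∨ su = 1) (hv : sv = 0 ∨ sv = 1)
    (hf : f = 0 ∨ f = 1) :
    decide (PySem.Int.bxor su f ≠ PySem.Int.bxor sv f) = decide (su ≠ sv) := by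
  rcases hu with rfl | rfl <;> rcases hv with rfl | rfl <;> rcases hf with rfl | rfl <;> decide

theorem pvParityCross {su sj si sv : Int} (h1 : su = 0 ∨ su = 1) (h2 : sj = 0 ∨ sj = 1)
    (h3 : si = 0 ∨ si = 1) (h4 : sv = 0 ∨ sv = 1) :
    xor (xor (decide (su ≠ sj)) true) (decide (si ≠ sv)) =
      decide (PySem.Int.bxor su (PySem.Int.bxor (PySem.Int.bxor si sj) 1) ≠ sv) := by
  rcases h1 with rfl | rfl <;> rcases h2 with rfl | rfl <;> rcases h3 with rfl | rfl <;>
    rcases h4 with rfl | rfl <;> decide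

theorem pvSideColor {su sv : Int} (hu : su = 0 ∨ su = 1) (hv : sv = 0 ∨ sv = 1) (h : su ≠ sv) :
    decide (su = 1) ≠ decide (sv = 1) := by
  rcases hu with rfl | rfl <;> rcases hv with rfl | rfl <;> simp_all


-- ===== A-side: adjacency list characterization =====
def pvAllPairs (n : Int) : List (Int × Int) :=
  (PySem.List.pyRange 0 n 1).flatMap (fun i => (PySem.List.pyRange (i + 1) n 1).map (fun j => (i, j)))

theorem mem_pvAllPairs (n : Int) (p : Int × Int) :
    p ∈ pvAllPairs n ↔ 0 ≤ p.1 ∧ p.1 < p.2 ∧ p.2 < n := by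
  obtain ⟨a, b⟩ := p
  unfold pvAllPairs
  dsimp only
  constructor
  · intro h
    simp only [List.mem_flatMap, List.mem_map, PySem.List.mem_pyRange_one] at h
    obtain ⟨x, ⟨hx0, hxn⟩, y, ⟨hy, hyn⟩, heq⟩ := h
    cases heq
    exact ⟨hx0, by omega, hyn⟩
  · rintro ⟨h1, h2, h3⟩
    simp only [List.mem_flatMap, List.mem_map, PySem.List.mem_pyRange_one]
    exact ⟨a, ⟨h1, by omega⟩, b, ⟨by omega, h3⟩, rfl⟩

def pvAdjStep (points : List (List Int)) (d : Int) (adj2 : List (List Int)) (p : Int × Int) :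
    List (List Int) :=
  if pvDist points p.1 p.2 < d then
    PySem.List.pySetD
      (PySem.List.pySetD adj2 p.1 (PySem.List.pyGetD adj2 p.1 [] ++ [p.2]))
      p.2 (PySem.List.pyGetD (PySem.List.pySetD adj2 p.1 (PySem.List.pyGetD adj2 p.1 [] ++ [p.2])) p.2 [] ++ [p.1])
  else adj2

theorem pvAdj_eq (points : List (List Int)) (n d : Int) :
    pvAdj points n d = (pvAllPairs n).foldl (pvAdjStep points d)
      ((PySem.List.pyRange 0 n 1).map (fun _ => ([] : List Int))) := by
  unfold pvAdj pvAllPairs pvAdjStep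
  rw [List.foldl_flatMap]
  refine PySem.List.foldl_congr_mem _ _ _ _ ?_
  intro acc x _
  rw [List.foldl_map]

theorem pvAdj_fold_inv (points : List (List Int)) (d : Int) :
    ∀ (ps : List (Int × Int)) (a : List (List Int)),
      (∀ p ∈ ps, 0 ≤ p.1 ∧ p.1 < p.2 ∧ p.2 < (a.length : Int)) →
      (ps.foldl (pvAdjStep points d) a).length = a.length ∧
      ∀ u v : Int, 0 ≤ u →
        (v ∈ PySem.List.pyGetD (ps.foldl (pvAdjStep points d) a) u [] ↔
          v ∈ PySem.List.pyGetD a u [] ∨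
            ∃ p ∈ ps, ((p.1 = u ∧ p.2 = v) ∨ (p.1 = v ∧ p.2 = u)) ∧ pvDist points p.1 p.2 < d) := by
  intro ps
  induction ps with
  | nil =>
    intro a _
    refine ⟨rfl, fun u v hu => ?_⟩
    simp
  | cons p ps' ih =>
    obtain ⟨p1, p2⟩ := p
    intro a hbd
    obtain ⟨hp1, hp12, hp2⟩ := hbd (p1, p2) (by simp)
    dsimp only at hp1 hp12 hp2
    have hstep_len : (pvAdjStep points d a (p1, p2)).length = a.length := by
      unfold pvAdjStep
      split_ifs
      · rw [PySem.List.length_pySetD, PySem.List.length_pySetD]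
      · rfl
    have hstep_get : ∀ u v : Int, 0 ≤ u →
        (v ∈ PySem.List.pyGetD (pvAdjStep points d a (p1, p2)) u [] ↔
          v ∈ PySem.List.pyGetD a u [] ∨
            (((p1 = u ∧ p2 = v) ∨ (p1 = v ∧ p2 = u)) ∧ pvDist points p1 p2 < d)) := by
      intro u v hu
      unfold pvAdjStep
      dsimp only
      split_ifs with hdist
      · have hget3 : PySem.List.pyGetD (PySem.List.pySetD a p1 (PySem.List.pyGetD a p1 [] ++ [p2])) p2 ([] : List Int) =
            PySem.List.pyGetD a p2 [] :=
          pvGet_set_other _ _ _ _ _ (by omega) (by omega) (by omega) (by omega)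
        rw [hget3]
        by_cases hu2 : u = p2
        · subst hu2
          rw [pvGet_set_self _ _ _ _ (by omega) (by rw [PySem.List.length_pySetD]; omega)]
          simp only [List.mem_append, List.mem_singleton]
          constructor
          · rintro (h | h)
            · exact Or.inl h
            · exact Or.inr ⟨Or.inr ⟨h.symm, trivial⟩, hdist⟩
          · rintro (h | ⟨⟨h1, h2⟩ | ⟨h1, h2⟩, _⟩)
            · exact Or.inl h
            · omega
            · exact Or.inr h1.symm
        · rw [pvGet_set_other _ _ _ _ _ (by omega) (by rw [PySem.List.length_pySetD]; omega) hu hu2]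
          by_cases hu1 : u = p1
          · subst hu1
            rw [pvGet_set_self _ _ _ _ (by omega) (by omega)]
            simp only [List.mem_append, List.mem_singleton]
            constructor
            · rintro (h | h)
              · exact Or.inl h
              · exact Or.inr ⟨Or.inl ⟨trivial, h.symm⟩, hdist⟩
            · rintro (h | ⟨⟨h1, h2⟩ | ⟨h1, h2⟩, _⟩)
              · exact Or.inl h
              · exact Or.inr h2.symm
              · omega
          · rw [pvGet_set_other _ _ _ _ _ (by omega) (by omega) hu hu1]
            constructor
            · exact Or.inl
            · rintro (h | ⟨⟨h1, h2⟩ | ⟨h1, h2⟩, _⟩)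
              · exact h
              · exact absurd h1 (fun hh => hu1 hh.symm)
              · exact absurd h2 (fun hh => hu2 hh.symm)
      · constructor
        · exact Or.inl
        · rintro (h | ⟨_, hd⟩)
          · exact h
          · exact absurd hd hdist
    have hbd' : ∀ q ∈ ps', 0 ≤ q.1 ∧ q.1 < q.2 ∧ q.2 < ((pvAdjStep points d a (p1, p2)).length : Int) := by
      intro q hq
      have := hbd q (by simp [hq])
      rw [hstep_len]
      exact this
    obtain ⟨ih1, ih2⟩ := ih (pvAdjStep points d a (p1, p2)) hbd'
    refine ⟨by rw [List.foldl_cons, ih1, hstep_len], fun u v hu => ?_⟩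
    rw [List.foldl_cons, ih2 u v hu, hstep_get u v hu]
    constructor
    · rintro ((h | h) | ⟨q, hq, hcond⟩)
      · exact Or.inl h
      · exact Or.inr ⟨(p1, p2), by simp, h⟩
      · exact Or.inr ⟨q, by simp [hq], hcond⟩
    · rintro (h | ⟨q, hq, hcond⟩)
      · exact Or.inl (Or.inl h)
      · rcases List.mem_cons.mp hq with rfl | hq'
        · exact Or.inl (Or.inr hcond)
        · exact Or.inr ⟨q, hq', hcond⟩

theorem pvInit_get (n u : Int) :
    PySem.List.pyGetD ((PySem.List.pyRange 0 n 1).map (fun _ => ([] : List Int))) u [] = [] := by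
  rcases h : PySem.List.pyGet? ((PySem.List.pyRange 0 n 1).map (fun _ => ([] : List Int))) u with _ | x
  · simp only [PySem.List.pyGetD]
    rw [h]
    rfl
  · have hx := PySem.List.mem_of_pyGet?_eq_some _ h
    simp only [List.mem_map] at hx
    obtain ⟨_, _, rfl⟩ := hx
    simp only [PySem.List.pyGetD]
    rw [h]
    rfl

theorem pvAdj_spec (points : List (List Int)) (d : Int) :
    (pvAdj points (points.length : Int) d).length = points.length ∧
    ∀ u v : Int, 0 ≤ u →
      (v ∈ PySem.List.pyGetD (pvAdj points (points.length : Int) d) u [] ↔ pvE points d u v) := by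
  rw [pvAdj_eq]
  have hinit_len : (((PySem.List.pyRange 0 (points.length : Int) 1).map
      (fun _ => ([] : List Int))).length : Int) = (points.length : Int) := by
    rw [List.length_map, PySem.List.length_pyRange_one]
    omega
  obtain ⟨h1, h2⟩ := pvAdj_fold_inv points d (pvAllPairs (points.length : Int)) _
    (by
      intro p hp
      rw [mem_pvAllPairs] at hp
      rw [hinit_len]
      exact hp)
  constructor
  · rw [h1, List.length_map, PySem.List.length_pyRange_one]; omega
  · intro u v hu
    rw [h2 u v hu, pvInit_get]
    simp only [List.not_mem_nil, false_or]
    constructor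
    · rintro ⟨⟨q1, q2⟩, hq, hcond⟩
      rw [mem_pvAllPairs] at hq
      dsimp only at hq hcond
      rcases hcond with ⟨⟨rfl, rfl⟩ | ⟨rfl, rfl⟩, hd⟩
      · exact ⟨by omega, by omega, by omega, by omega, by omega, hd⟩
      · exact ⟨by omega, by omega, by omega, by omega, by omega, by rwa [pvDist_comm]⟩
    · rintro ⟨hu0, huL, hv0, hvL, huv, hd⟩
      rcases lt_trichotomy u v with h | h | h
      · exact ⟨(u, v), (mem_pvAllPairs _ _).mpr ⟨by omega, by omega, by omega⟩, Or.inl ⟨rfl, rfl⟩, hd⟩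
      · exact absurd h huv
      · exact ⟨(v, u), (mem_pvAllPairs _ _).mpr ⟨by omega, by omega, by omega⟩, Or.inr ⟨rfl, rfl⟩,
          by rwa [pvDist_comm]⟩


-- ===== A-side: BFS state invariants =====
def pvUnc (points : List (List Int)) (c : List Int) : Nat :=
  ((List.range points.length).filter (fun k : Nat => decide (pvAt c ((k : Nat) : Int) = -1))).length

def pvMeas (points : List (List Int)) (c q : List Int) : Nat := 2 * pvUnc points c + q.length

theorem pvUnc_le (points : List (List Int)) (c : List Int) : pvUnc points c ≤ points.length := by
  unfold pvUnc
  have h := List.length_filter_le (fun k : Nat => decide (pvAt c ((k : Nat) : Int) = -1)) (List.range points.length)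
  simpa using h

theorem pvUnc_dec (points : List (List Int)) (c c1 : List Int) (v : Int)
    (h0 : 0 ≤ v) (h1 : v < (points.length : Int))
    (hv : pvAt c v = -1) (hv1 : pvAt c1 v ≠ -1)
    (hother : ∀ m : Int, 0 ≤ m → m ≠ v → pvAt c1 m = pvAt c m) :
    pvUnc points c1 + 1 = pvUnc points c := by
  unfold pvUnc
  have e1 : points.length = v.toNat + ((points.length - v.toNat - 1) + 1) := by omega
  rw [e1, List.range_add, List.range_succ_eq_map]
  have hfront : (List.range v.toNat).filter (fun k : Nat => decide (pvAt c1 ((k : Nat) : Int) = -1)) =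
      (List.range v.toNat).filter (fun k : Nat => decide (pvAt c ((k : Nat) : Int) = -1)) := by
    apply List.filter_congr
    intro k hk
    rw [List.mem_range] at hk
    rw [hother (k : Int) (by omega) (by omega)]
  have htail : ∀ (l : List Nat), (∀ x ∈ l, v < ((x : Nat) : Int)) →
      l.filter (fun k : Nat => decide (pvAt c1 ((k : Nat) : Int) = -1)) =
      l.filter (fun k : Nat => decide (pvAt c ((k : Nat) : Int) = -1)) := by
    intro l hl
    apply List.filter_congr
    intro k hk
    rw [hother ((k : Nat) : Int) (by omega) (by have := hl k hk; omega)]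
  simp only [List.map_cons, List.filter_append, List.length_append, List.filter_cons]
  rw [hfront]
  rw [htail (((List.range (points.length - v.toNat - 1)).map Nat.succ).map (fun x => v.toNat + x))
    (by
      intro x hx
      simp only [List.mem_map] at hx
      obtain ⟨y, ⟨z, _, rfl⟩, rfl⟩ := hx
      omega)]
  have hcast : ((v.toNat + 0 : Nat) : Int) = v := by omega
  rw [hcast]
  simp only [hv, hv1]
  simp
  omega

theorem pvFlip_facts {cu : Int} (hcu : cu = 0 ∨ cu = 1) :
    PySem.Int.bxor cu 1 ≠ -1 ∧ (PySem.Int.bxor cu 1 = 0 ∨ PySem.Int.bxor cu 1 = 1) ∧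
      PySem.Int.bxor cu 1 ≠ cu := by
  rcases hcu with rfl | rfl <;> refine ⟨by decide, by decide, by decide⟩

-- effect bundle of one neighbour scan
def pvNB (points : List (List Int)) (d u cu : Int) (vs c q c' q' : List Int) : Prop :=
  c'.length = c.length ∧
  (∀ v : Int, 0 ≤ v → pvAt c v ≠ -1 → pvAt c' v = pvAt c v) ∧
  (∀ v : Int, 0 ≤ v → pvAt c v = -1 → pvAt c' v ≠ -1 →
      pvAt c' v = PySem.Int.bxor cu 1 ∧ pvE points d u v ∧ v ∈ q') ∧
  (∀ x ∈ q', x ∈ q ∨ (0 ≤ x ∧ x < (points.length : Int) ∧ pvAt c x = -1 ∧ pvAt c' x ≠ -1)) ∧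
  (∀ x ∈ q, x ∈ q') ∧
  q'.Nodup ∧
  (∀ v ∈ vs, pvAt c' v ≠ -1 ∧ pvAt c' v ≠ cu) ∧
  pvMeas points c' q' ≤ pvMeas points c q

theorem pvNbrs_spec (points : List (List Int)) (d u cu : Int)
    (hu0 : 0 ≤ u) (huL : u < (points.length : Int)) (hcu : cu = 0 ∨ cu = 1) :
    ∀ (vs c q : List Int),
      c.length = points.length →
      pvAt c u = cu →
      (∀ v ∈ vs, pvE points d u v) →
      (∀ x ∈ q, 0 ≤ x ∧ x < (points.length : Int) ∧ pvAt c x ≠ -1) →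
      q.Nodup →
      (pvNbrs cu vs c q = none → ∃ v, pvE points d u v ∧ pvAt c v = cu) ∧
      (∀ c' q', pvNbrs cu vs c q = some (c', q') → pvNB points d u cu vs c q c' q') := by
  obtain ⟨hfne, hf01, hfcu⟩ := pvFlip_facts hcu
  intro vs
  induction vs with
  | nil =>
    intro c q hclen hatu hvs hq hqnd
    constructor
    · intro h; cases h
    · intro c' q' heq
      obtain ⟨rfl, rfl⟩ : c = c' ∧ q = q' := by
        simpa [pvNbrs] using heq
      exact ⟨rfl, fun v _ _ => rfl, fun v _ h1 h2 => absurd h1 h2,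
        fun x hx => Or.inl hx, fun x hx => hx, hqnd, by simp, le_refl _⟩
  | cons v rest ih =>
    intro c q hclen hatu hvs hq hqnd
    have hv := hvs v (by simp)
    obtain ⟨_, _, hv0, hvL, huv, _⟩ := hv
    have hvL' : v < (c.length : Int) := by rw [hclen]; exact hvL
    by_cases h1 : pvAt c v = -1
    · -- v gets coloured and pushed
      have hstep : pvNbrs cu (v :: rest) c q =
          pvNbrs cu rest (PySem.List.pySetD c v (PySem.Int.bxor cu 1)) (q ++ [v]) := by
        rw [pvNbrs, ← pvAt_def, if_pos h1]
      set c1 := PySem.List.pySetD c v (PySem.Int.bxor cu 1) with hc1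
      have hlen1 : c1.length = c.length := PySem.List.length_pySetD _ _ _
      have hat1v : pvAt c1 v = PySem.Int.bxor cu 1 := pvAt_set_self _ _ _ hv0 hvL'
      have hat1 : ∀ m : Int, 0 ≤ m → m ≠ v → pvAt c1 m = pvAt c m := fun m hm hne =>
        pvAt_set_other _ _ _ _ hv0 hvL' hm hne
      have hat1u : pvAt c1 u = cu := by rw [hat1 u hu0 huv, hatu]
      have hvq : v ∉ q := fun hvq => absurd h1 (by simpa using (hq v hvq).2.2)
      have hq1 : ∀ x ∈ q ++ [v], 0 ≤ x ∧ x < (points.length : Int) ∧ pvAt c1 x ≠ -1 := by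
        intro x hx
        rcases List.mem_append.mp hx with hx | hx
        · obtain ⟨a, b, cc⟩ := hq x hx
          have hxv : x ≠ v := fun h => hvq (h ▸ hx)
          exact ⟨a, b, by rw [hat1 x a hxv]; exact cc⟩
        · rw [List.mem_singleton] at hx
          subst hx
          exact ⟨hv0, hvL, by rw [hat1v]; exact hfne⟩
      have hq1nd : (q ++ [v]).Nodup := by
        rw [List.nodup_append]
        refine ⟨hqnd, List.nodup_singleton _, ?_⟩
        intro a ha b hb hab
        rw [List.mem_singleton] at hb
        rw [hab, hb] at ha
        exact hvq ha
      have hmeas1 : pvMeas points c1 (q ++ [v]) + 1 = pvMeas points c q := by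
        have hud := pvUnc_dec points c c1 v hv0 hvL h1 (by rw [hat1v]; exact hfne) hat1
        simp only [pvMeas, List.length_append, List.length_cons, List.length_nil]
        omega
      obtain ⟨ihn, ihs⟩ := ih c1 (q ++ [v]) (by rw [hlen1]; exact hclen) hat1u
        (fun w hw => hvs w (by simp [hw])) hq1 hq1nd
      constructor
      · intro hnone
        rw [hstep] at hnone
        obtain ⟨w, hwE, hwc⟩ := ihn hnone
        have hw0 : 0 ≤ w := hwE.2.2.1
        have hwv : w ≠ v := by
          intro h
          rw [h, hat1v] at hwc
          exact hfcu hwc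
        exact ⟨w, hwE, by rw [← hat1 w hw0 hwv]; exact hwc⟩
      · intro c' q' heq
        rw [hstep] at heq
        obtain ⟨l1, l2, l3, l4, l5, l6, l7, l8⟩ := ihs c' q' heq
        refine ⟨by rw [l1, hlen1], ?_, ?_, ?_, ?_, l6, ?_, by omega⟩
        · intro w hw0 hwc
          have hwv : w ≠ v := fun h => absurd (h ▸ hwc) (by simp [h1])
          rw [l2 w hw0 (by rw [hat1 w hw0 hwv]; exact hwc), hat1 w hw0 hwv]
        · intro w hw0 hwc hwc'
          by_cases hwv : w = v
          · subst hwv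
            refine ⟨by rw [l2 w hw0 (by rw [hat1v]; exact hfne), hat1v], hvs w (by simp), ?_⟩
            exact l5 w (by simp)
          · have hw1 : pvAt c1 w = -1 := by rw [hat1 w hw0 hwv]; exact hwc
            obtain ⟨a, b, cc⟩ := l3 w hw0 hw1 hwc'
            exact ⟨a, b, cc⟩
        · intro x hx
          rcases l4 x hx with hxq1 | ⟨a, b, cc, dd⟩
          · rcases List.mem_append.mp hxq1 with h | h
            · exact Or.inl h
            · rw [List.mem_singleton] at h
              subst h
              refine Or.inr ⟨hv0, hvL, h1, ?_⟩
              rw [l2 x hv0 (by rw [hat1v]; exact hfne), hat1v]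
              exact hfne
          · have hxv : x ≠ v := fun h => absurd (h ▸ cc) (by simp [hat1v, hfne])
            exact Or.inr ⟨a, b, by rw [← hat1 x a hxv]; exact cc, dd⟩
        · intro x hx
          exact l5 x (List.mem_append.mpr (Or.inl hx))
        · intro w hw
          rcases List.mem_cons.mp hw with rfl | hw'
          · constructor
            · rw [l2 w hv0 (by rw [hat1v]; exact hfne), hat1v]
              exact hfne
            · rw [l2 w hv0 (by rw [hat1v]; exact hfne), hat1v]
              exact hfcu
          · exact l7 w hw'
    · by_cases h2 : pvAt c v = cu
      · have hstep : pvNbrs cu (v :: rest) c q = none := by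
          rw [pvNbrs, ← pvAt_def, if_neg h1, if_pos h2]
        constructor
        · intro _
          exact ⟨v, hvs v (by simp), h2⟩
        · intro c' q' heq
          rw [hstep] at heq
          cases heq
      · have hstep : pvNbrs cu (v :: rest) c q = pvNbrs cu rest c q := by
          rw [pvNbrs, ← pvAt_def, if_neg h1, if_neg h2]
        obtain ⟨ihn, ihs⟩ := ih c q hclen hatu (fun w hw => hvs w (by simp [hw])) hq hqnd
        constructor
        · intro hnone
          rw [hstep] at hnone
          exact ihn hnone
        · intro c' q' heq
          rw [hstep] at heq
          obtain ⟨l1, l2, l3, l4, l5, l6, l7, l8⟩ := ihs c' q' heq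
          refine ⟨l1, l2, l3, l4, l5, l6, ?_, l8⟩
          intro w hw
          rcases List.mem_cons.mp hw with rfl | hw'
          · rw [l2 w hv0 h1]
            exact ⟨h1, h2⟩
          · exact l7 w hw'


def pvG (points : List (List Int)) (d : Int) (c q : List Int) : Prop :=
  c.length = points.length ∧
  (∀ v : Int, 0 ≤ v → v < (points.length : Int) → pvAt c v = -1 ∨ pvAt c v = 0 ∨ pvAt c v = 1) ∧
  (∀ x ∈ q, 0 ≤ x ∧ x < (points.length : Int) ∧ pvAt c x ≠ -1) ∧
  q.Nodup ∧
  (∀ u : Int, 0 ≤ u → u < (points.length : Int) → pvAt c u ≠ -1 → u ∉ q →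
    ∀ v : Int, pvE points d u v → pvAt c v ≠ -1 ∧ pvAt c v ≠ pvAt c u)

def pvPh (points : List (List Int)) (d : Int) (c0 : List Int) (s : Int) (c q : List Int) : Prop :=
  (∀ v : Int, 0 ≤ v → v < (points.length : Int) → pvAt c0 v ≠ -1 → pvAt c v = pvAt c0 v) ∧
  (∀ v ∈ q, pvAt c0 v = -1) ∧
  (∀ v : Int, 0 ≤ v → v < (points.length : Int) → pvAt c0 v = -1 → pvAt c v ≠ -1 →
    pvWalk (pvE points d) s v (decide (pvAt c v = 1)))

theorem pvBFS_spec (points : List (List Int)) (d : Int) (c0 : List Int) (s : Int)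
    (hG0 : pvG points d c0 []) (hs0 : 0 ≤ s) (hsL : s < (points.length : Int)) :
    ∀ (fuel : Nat) (c q : List Int),
      pvG points d c q → pvPh points d c0 s c q → pvMeas points c q < fuel →
      ((pvBFS (pvAdj points (points.length : Int) d) c q fuel = none → ¬ pvBip points d) ∧
       (∀ c', pvBFS (pvAdj points (points.length : Int) d) c q fuel = some c' →
          pvG points d c' [] ∧
          (∀ v : Int, 0 ≤ v → v < (points.length : Int) → pvAt c v ≠ -1 → pvAt c' v = pvAt c v))) := by
  intro fuel
  induction fuel with
  | zero => intro c q _ _ hmeas; omega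
  | succ f ihf =>
    intro c q hG hPh hmeas
    obtain ⟨hclen, hcok, hq, hqnd, hsettled⟩ := hG
    obtain ⟨hPh1, hPh2, hPh3⟩ := hPh
    cases q with
    | nil =>
      constructor
      · intro h; simp [pvBFS] at h
      · intro c' heq
        have hc : c = c' := by simpa [pvBFS] using heq
        subst hc
        exact ⟨⟨hclen, hcok, hq, hqnd, hsettled⟩, fun v _ _ _ => rfl⟩
    | cons u rest =>
      obtain ⟨hu0, huL, hucol⟩ := hq u (by simp)
      have hcu : pvAt c u = 0 ∨ pvAt c u = 1 := by
        rcases hcok u hu0 huL with h | h | h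
        · exact absurd h hucol
        · exact Or.inl h
        · exact Or.inr h
      obtain ⟨hadjlen, hadjmem⟩ := pvAdj_spec points d
      have hvs : ∀ v ∈ PySem.List.pyGetD (pvAdj points (points.length : Int) d) u [],
          pvE points d u v := fun v hv => (hadjmem u v hu0).mp hv
      have hrest : ∀ x ∈ rest, 0 ≤ x ∧ x < (points.length : Int) ∧ pvAt c x ≠ -1 :=
        fun x hx => hq x (by simp [hx])
      have hurest : u ∉ rest := (List.nodup_cons.mp hqnd).1
      have hrestnd : rest.Nodup := (List.nodup_cons.mp hqnd).2
      obtain ⟨hnone, hsome⟩ := pvNbrs_spec points d u (pvAt c u) hu0 huL hcu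
        (PySem.List.pyGetD (pvAdj points (points.length : Int) d) u []) c rest
        hclen rfl hvs hrest hrestnd
      obtain ⟨hfne, hf01, hfcu⟩ := pvFlip_facts hcu
      rcases hres : pvNbrs (PySem.List.pyGetD c u 0)
          (PySem.List.pyGetD (pvAdj points (points.length : Int) d) u []) c rest with _ | cq
      · -- conflict: odd closed walk, graph not bipartite
        rw [← pvAt_def] at hres
        obtain ⟨v, hvE, hvcu⟩ := hnone hres
        have hstep : pvBFS (pvAdj points (points.length : Int) d) c (u :: rest) (f + 1) = none := by
          simp only [pvBFS, ← pvAt_def]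
          rw [hres]
        have hnb : ¬ pvBip points d := by
          obtain ⟨_, _, hv0, hvL, huv, _⟩ := id hvE
          have hc0u : pvAt c0 u = -1 := hPh2 u (by simp)
          have hvcol : pvAt c v ≠ -1 := by rw [hvcu]; rcases hcu with h | h <;> simp [h]
          have hc0v : pvAt c0 v = -1 := by
            by_contra h
            exact absurd (hG0.2.2.2.2 v hv0 hvL h (List.not_mem_nil) u
              (pvE_symm points d u v hvE)).1 (by simpa using hc0u)
          have Wu := hPh3 u hu0 huL hc0u hucol
          have Wv := hPh3 v hv0 hvL hc0v hvcol
          have Wuv : pvWalk (pvE points d) u v (!false) := pvWalk.cons hvE (pvWalk.nil v)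
          have W := pvWalk_append (pvWalk_append Wu Wuv)
            (pvWalk_symm (fun a b h => pvE_symm points d a b h) Wv)
          have hpar : xor (xor (decide (pvAt c u = 1)) (!false)) (decide (pvAt c v = 1)) = true := by
            rw [hvcu]
            cases (decide (pvAt c u = 1)) <;> decide
          rw [hpar] at W
          rintro ⟨cφ, hφ⟩
          exact pvNoOddClosed hφ W
        exact ⟨fun _ => hnb, fun c' heq => by rw [hstep] at heq; cases heq⟩
      · -- continue with updated state
        obtain ⟨c1, q1⟩ := cq
        rw [← pvAt_def] at hres
        obtain ⟨l1, l2, l3, l4, l5, l6, l7, l8⟩ := hsome c1 q1 hres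
        have hstep : pvBFS (pvAdj points (points.length : Int) d) c (u :: rest) (f + 1) =
            pvBFS (pvAdj points (points.length : Int) d) c1 q1 f := by
          simp only [pvBFS, ← pvAt_def]
          rw [hres]
        have hat1u : pvAt c1 u = pvAt c u := l2 u hu0 hucol
        have hG1 : pvG points d c1 q1 := by
          refine ⟨l1.trans hclen, ?_, ?_, l6, ?_⟩
          · intro v hv0 hvL
            by_cases hcv : pvAt c v = -1
            · by_cases hcv1 : pvAt c1 v = -1
              · exact Or.inl hcv1
              · rw [(l3 v hv0 hcv hcv1).1]
                rcases hf01 with h | h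
                · exact Or.inr (Or.inl h)
                · exact Or.inr (Or.inr h)
            · rw [l2 v hv0 hcv]
              exact hcok v hv0 hvL
          · intro x hx
            rcases l4 x hx with hxr | ⟨a, b, cc, dd⟩
            · obtain ⟨a, b, cc⟩ := hrest x hxr
              exact ⟨a, b, by rw [l2 x a cc]; exact cc⟩
            · exact ⟨a, b, dd⟩
          · intro x hx0 hxL hxcol hxq1 v' hE
            by_cases hxu : x = u
            · subst hxu
              have hv'mem := (hadjmem x v' hx0).mpr hE
              obtain ⟨hc1, hc2⟩ := l7 v' hv'mem
              exact ⟨hc1, by rw [hat1u]; exact hc2⟩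
            · have hxc : pvAt c x ≠ -1 := by
                by_contra h
                exact hxq1 (l3 x hx0 (by simpa using h) hxcol).2.2
              have hxrest : x ∉ rest := fun hr => hxq1 (l5 x hr)
              have hxq : x ∉ u :: rest := by
                intro h
                rcases List.mem_cons.mp h with h | h
                · exact hxu h
                · exact hxrest h
              obtain ⟨hv'col, hv'ne⟩ := hsettled x hx0 hxL hxc hxq v' hE
              obtain ⟨_, _, hv'0, hv'L, _, _⟩ := hE
              exact ⟨by rw [l2 v' hv'0 hv'col]; exact hv'col,
                by rw [l2 v' hv'0 hv'col, l2 x hx0 hxc]; exact hv'ne⟩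
        have hPhn : pvPh points d c0 s c1 q1 := by
          refine ⟨?_, ?_, ?_⟩
          · intro v hv0 hvL hc0v
            rw [l2 v hv0 (by rw [hPh1 v hv0 hvL hc0v]; exact hc0v)]
            exact hPh1 v hv0 hvL hc0v
          · intro x hx
            rcases l4 x hx with hxr | ⟨a, b, cc, dd⟩
            · exact hPh2 x (by simp [hxr])
            · by_contra h
              have e := hPh1 x a b h
              rw [e] at cc
              exact h cc
          · intro v hv0 hvL hc0v hc1v
            by_cases hcv : pvAt c v = -1
            · obtain ⟨hval, hE, _⟩ := l3 v hv0 hcv hc1v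
              have Wu := hPh3 u hu0 huL (hPh2 u (by simp)) hucol
              have W : pvWalk (pvE points d) s v (xor (decide (pvAt c u = 1)) (!false)) :=
                pvWalk_append Wu (pvWalk.cons hE (pvWalk.nil v))
              have hpar : xor (decide (pvAt c u = 1)) (!false) = decide (pvAt c1 v = 1) := by
                rw [hval]
                rcases hcu with h | h <;> rw [h] <;> decide
              rwa [hpar] at W
            · rw [l2 v hv0 hcv]
              exact hPh3 v hv0 hvL hc0v hcv
        have hmeas1 : pvMeas points c1 q1 < f := by
          have e : pvMeas points c (u :: rest) = pvMeas points c rest + 1 := by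
            simp only [pvMeas, List.length_cons]
            omega
          omega
        obtain ⟨ihn, ihs⟩ := ihf c1 q1 hG1 hPhn hmeas1
        constructor
        · intro h
          rw [hstep] at h
          exact ihn h
        · intro c' heq
          rw [hstep] at heq
          obtain ⟨hG', hext'⟩ := ihs c' heq
          refine ⟨hG', ?_⟩
          intro v hv0 hvL hvcol
          rw [hext' v hv0 hvL (by rw [l2 v hv0 hvcol]; exact hvcol), l2 v hv0 hvcol]

theorem pvStarts_spec (points : List (List Int)) (d : Int) :
    ∀ (ss : List Int) (c : List Int),
      pvG points d c [] → (∀ x ∈ ss, 0 ≤ x ∧ x < (points.length : Int)) →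
      ((pvStarts (pvAdj points (points.length : Int) d) (2 * points.length + 2) c ss = none →
          ¬ pvBip points d) ∧
       (∀ c', pvStarts (pvAdj points (points.length : Int) d) (2 * points.length + 2) c ss = some c' →
          pvG points d c' [] ∧ (∀ v ∈ ss, pvAt c' v ≠ -1) ∧
          (∀ v : Int, 0 ≤ v → v < (points.length : Int) → pvAt c v ≠ -1 → pvAt c' v = pvAt c v))) := by
  intro ss
  induction ss with
  | nil =>
    intro c hG _
    constructor
    · intro h; simp [pvStarts] at h
    · intro c' heq
      have hc : c = c' := by simpa [pvStarts] using heq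
      subst hc
      exact ⟨hG, by simp, fun v _ _ _ => rfl⟩
  | cons t ss' ih =>
    intro c hG hbd
    obtain ⟨ht0, htL⟩ := hbd t (by simp)
    obtain ⟨hclen, hcok, _, _, hsettled⟩ := hG
    by_cases hcs : pvAt c t = -1
    · set c1 := PySem.List.pySetD c t 0 with hc1def
      have hlen1 : c1.length = c.length := PySem.List.length_pySetD _ _ _
      have hat1t : pvAt c1 t = 0 := pvAt_set_self _ _ _ ht0 (by rw [hclen]; exact htL)
      have hat1 : ∀ m : Int, 0 ≤ m → m ≠ t → pvAt c1 m = pvAt c m := fun m hm hne =>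
        pvAt_set_other _ _ _ _ ht0 (by rw [hclen]; exact htL) hm hne
      have hG1 : pvG points d c1 [t] := by
        refine ⟨hlen1.trans hclen, ?_, ?_, List.nodup_singleton _, ?_⟩
        · intro v hv0 hvL
          by_cases hvt : v = t
          · subst hvt; rw [hat1t]; exact Or.inr (Or.inl rfl)
          · rw [hat1 v hv0 hvt]; exact hcok v hv0 hvL
        · intro x hx
          rw [List.mem_singleton] at hx
          subst hx
          exact ⟨ht0, htL, by rw [hat1t]; decide⟩
        · intro x hx0 hxL hxcol hxq v' hE
          have hxt : x ≠ t := by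
            intro h
            exact hxq (by rw [h]; simp)
          have hxc : pvAt c x ≠ -1 := by rwa [hat1 x hx0 hxt] at hxcol
          obtain ⟨hv'col, hv'ne⟩ := hsettled x hx0 hxL hxc (List.not_mem_nil) v' hE
          obtain ⟨_, _, hv'0, _, _, _⟩ := hE
          have hv't : v' ≠ t := by
            intro h
            rw [h] at hv'col
            exact hv'col hcs
          exact ⟨by rw [hat1 v' hv'0 hv't]; exact hv'col,
            by rw [hat1 v' hv'0 hv't, hat1 x hx0 hxt]; exact hv'ne⟩
      have hPh1 : pvPh points d c t c1 [t] := by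
        refine ⟨?_, ?_, ?_⟩
        · intro v hv0 _ hcv
          have hvt : v ≠ t := by
            intro h
            rw [h] at hcv
            exact hcv hcs
          exact hat1 v hv0 hvt
        · intro v hv
          rw [List.mem_singleton] at hv
          subst hv
          exact hcs
        · intro v hv0 hvL hc0v hc1v
          have hvt : v = t := by
            by_contra h
            rw [hat1 v hv0 h] at hc1v
            exact hc1v hc0v
          subst hvt
          rw [show decide (pvAt c1 v = 1) = false by rw [hat1t]; decide]
          exact pvWalk.nil v
      have hmeas : pvMeas points c1 [t] < 2 * points.length + 2 := by
        have := pvUnc_le points c1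
        simp only [pvMeas, List.length_singleton]
        omega
      obtain ⟨bfsn, bfss⟩ := pvBFS_spec points d c t ⟨hclen, hcok, by simp, List.nodup_nil,
        fun u a b cc _ v hE => hsettled u a b cc (List.not_mem_nil) v hE⟩ ht0 htL
        (2 * points.length + 2) c1 [t] hG1 hPh1 hmeas
      rcases hres : pvBFS (pvAdj points (points.length : Int) d) c1 [t]
          (2 * points.length + 2) with _ | c2
      · have hstep : pvStarts (pvAdj points (points.length : Int) d) (2 * points.length + 2)
            c (t :: ss') = none := by
          rw [pvStarts, ← pvAt_def, if_pos hcs, ← hc1def, hres]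
        refine ⟨fun _ => bfsn hres, fun c' heq => by rw [hstep] at heq; cases heq⟩
      · obtain ⟨hG2, hext2⟩ := bfss c2 hres
        have hstep : pvStarts (pvAdj points (points.length : Int) d) (2 * points.length + 2)
            c (t :: ss') = pvStarts (pvAdj points (points.length : Int) d)
            (2 * points.length + 2) c2 ss' := by
          rw [pvStarts, ← pvAt_def, if_pos hcs, ← hc1def, hres]
        obtain ⟨ihn, ihs⟩ := ih c2 hG2 (fun x hx => hbd x (by simp [hx]))
        constructor
        · intro h
          rw [hstep] at h
          exact ihn h
        · intro c' heq
          rw [hstep] at heq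
          obtain ⟨hG', hss', hext'⟩ := ihs c' heq
          have hat2t : pvAt c2 t = 0 := by
            rw [hext2 t ht0 htL (by rw [hat1t]; decide)]
            exact hat1t
          refine ⟨hG', ?_, ?_⟩
          · intro v hv
            rcases List.mem_cons.mp hv with rfl | hv'
            · rw [hext' v ht0 htL (by rw [hat2t]; decide), hat2t]
              decide
            · exact hss' v hv'
          · intro v hv0 hvL hvcol
            have hvt : v ≠ t := by
              intro h
              rw [h] at hvcol
              exact hvcol hcs
            have h1 : pvAt c1 v = pvAt c v := hat1 v hv0 hvt
            have h2 : pvAt c2 v = pvAt c v := by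
              rw [hext2 v hv0 hvL (by rw [h1]; exact hvcol), h1]
            rw [hext' v hv0 hvL (by rw [h2]; exact hvcol), h2]
    · have hstep : pvStarts (pvAdj points (points.length : Int) d) (2 * points.length + 2)
          c (t :: ss') = pvStarts (pvAdj points (points.length : Int) d)
          (2 * points.length + 2) c ss' := by
        rw [pvStarts, ← pvAt_def, if_neg hcs]
      obtain ⟨ihn, ihs⟩ := ih c ⟨hclen, hcok, by simp, List.nodup_nil,
        fun u a b cc _ v hE => hsettled u a b cc (List.not_mem_nil) v hE⟩
        (fun x hx => hbd x (by simp [hx]))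
      constructor
      · intro h
        rw [hstep] at h
        exact ihn h
      · intro c' heq
        rw [hstep] at heq
        obtain ⟨hG', hss', hext'⟩ := ihs c' heq
        refine ⟨hG', ?_, hext'⟩
        intro v hv
        rcases List.mem_cons.mp hv with rfl | hv'
        · rw [hext' v ht0 htL hcs]
          exact hcs
        · exact hss' v hv'

-- ===== A-side correctness: pvCheck decides bipartiteness =====
theorem pvCheck_iff (points : List (List Int)) (d : Int) :
    pvCheck points points.length d = true ↔ pvBip points d := by
  have hfuel : 2 * ((points.length : Int)).toNat + 2 = 2 * points.length + 2 := by simp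
  have hGinit : pvG points d (PySem.List.pyRepeat [-1] (points.length : Int)) [] := by
    refine ⟨?_, ?_, by simp, List.nodup_nil, ?_⟩
    · rw [PySem.List.pyRepeat_singleton, List.length_replicate]
      omega
    · intro v h0 h1
      rw [pvAt_repeat _ _ _ h0 h1]
      exact Or.inl rfl
    · intro u h0 h1 hcol _ v hE
      rw [pvAt_repeat _ _ _ h0 h1] at hcol
      exact absurd rfl hcol
  have hbd : ∀ x ∈ PySem.List.pyRange 0 (points.length : Int) 1,
      0 ≤ x ∧ x < (points.length : Int) := fun x hx => PySem.List.mem_pyRange_one.mp hx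
  obtain ⟨hn, hs⟩ := pvStarts_spec points d (PySem.List.pyRange 0 (points.length : Int) 1)
    (PySem.List.pyRepeat [-1] (points.length : Int)) hGinit hbd
  unfold pvCheck
  rw [hfuel]
  rcases hres : pvStarts (pvAdj points (points.length : Int) d) (2 * points.length + 2)
      (PySem.List.pyRepeat [-1] (points.length : Int))
      (PySem.List.pyRange 0 (points.length : Int) 1) with _ | c'
  · refine iff_of_false (by simp) (hn hres)
  · refine iff_of_true (by simp) ?_
    obtain ⟨hG', hallcol, _⟩ := hs c' hres
    obtain ⟨hclen', hcok', _, _, hset'⟩ := hG'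
    refine ⟨fun v => decide (pvAt c' v = 1), ?_⟩
    intro u v hE
    obtain ⟨hu0, huL, hv0, hvL, huv, _⟩ := id hE
    have hucol : pvAt c' u ≠ -1 := hallcol u (PySem.List.mem_pyRange_one.mpr ⟨hu0, huL⟩)
    obtain ⟨hvcol, hvne⟩ := hset' u hu0 huL hucol (List.not_mem_nil) v hE
    have hu01 : pvAt c' u = 0 ∨ pvAt c' u = 1 := by
      rcases hcok' u hu0 huL with h | h | h
      · exact absurd h hucol
      · exact Or.inl h
      · exact Or.inr h
    have hv01 : pvAt c' v = 0 ∨ pvAt c' v = 1 := by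
      rcases hcok' v hv0 hvL with h | h | h
      · exact absurd h hvcol
      · exact Or.inl h
      · exact Or.inr h
    exact pvSideColor hu01 hv01 (Ne.symm hvne)

theorem pvBin_spec (points : List (List Int)) :
    ∀ (N : Nat) (lo hi ans : Int), (hi - lo).toNat ≤ N →
      ans = lo → (lo = 0 ∨ pvBip points lo) → (∀ e : Int, hi < e → ¬ pvBip points e) →
      pvBip points (pvBinSearch points (points.length : Int) lo hi ans) ∧
      ∀ e : Int, pvBinSearch points (points.length : Int) lo hi ans < e → ¬ pvBip points e := by
  intro N
  induction N with
  | zero =>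
    intro lo hi ans hN hans hlo hhi
    unfold pvBinSearch
    rw [dif_neg (by omega : ¬ lo < hi)]
    subst hans
    refine ⟨?_, fun e he => hhi e (by omega)⟩
    rcases hlo with rfl | h
    · exact pvBip_zero points 0 le_rfl
    · exact h
  | succ M ihm =>
    intro lo hi ans hN hans hlo hhi
    by_cases hlt : lo < hi
    · unfold pvBinSearch
      rw [dif_pos hlt]
      have hmid := PySem.Int.floordiv_two_mid_bounds (lo := lo + 1) (hi := hi) (by omega)
      have h3 : lo + 1 + hi = lo + hi + 1 := by ring
      rw [h3] at hmid
      by_cases hq : pvCheck points (points.length : Int)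
          (PySem.Int.floordiv (lo + hi + 1) 2) = true
      · rw [if_pos hq]
        exact ihm _ _ _ (by omega) rfl (Or.inr ((pvCheck_iff points _).mp hq)) hhi
      · rw [if_neg hq]
        refine ihm _ _ _ (by omega) hans hlo ?_
        intro e he hB
        apply hq
        rw [pvCheck_iff]
        exact pvBip_antitone points (by omega) hB
    · unfold pvBinSearch
      rw [dif_neg hlt]
      subst hans
      refine ⟨?_, fun e he => hhi e (by omega)⟩
      rcases hlo with rfl | h
      · exact pvBip_zero points 0 le_rfl
      · exact h

-- A's binary search result characterization
theorem pvA_char (points : List (List Int)) (hn : 3 ≤ points.length) :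
    pvBip points (maxPartitionFactor points) ∧
      ∀ e, maxPartitionFactor points < e → ¬ pvBip points e := by
  have hL3 : (3 : Int) ≤ (points.length : Int) := by exact_mod_cast hn
  have hL2 : ((points.length : Int)) ≠ 2 := by omega
  have hA : maxPartitionFactor points = pvBinSearch points (points.length : Int) 0
      ((PySem.List.max? ((PySem.List.sorted (pvDistances points (points.length : Int))
        (fun x => x.1) true).map (fun x => x.1)) (fun x => x)).getD 0 + 1) 0 := by
    simp only [maxPartitionFactor]
    rw [if_neg hL2]
  have hmem01 : (pvDist points 0 1, 0, 1) ∈ pvDistances points (points.length : Int) :=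
    (mem_pvDistances _ _ _).mpr (by
      refine ⟨le_refl 0, ?_, ?_, rfl⟩ <;> simp <;> omega)
  have hmemmap : pvDist points 0 1 ∈ (PySem.List.sorted (pvDistances points (points.length : Int))
      (fun x => x.1) true).map (fun x => x.1) := by
    refine List.mem_map.mpr ⟨(pvDist points 0 1, 0, 1), ?_, rfl⟩
    rw [PySem.List.mem_sorted]
    exact hmem01
  rcases hmax : PySem.List.max? ((PySem.List.sorted (pvDistances points (points.length : Int))
      (fun x => x.1) true).map (fun x => x.1)) (fun x => x) with _ | m
  · rw [PySem.List.max?_eq_none_iff] at hmax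
    rw [hmax] at hmemmap
    cases hmemmap
  · have hbound := PySem.List.max?_isMax hmax
    have hall : ∀ u v : Int, 0 ≤ u → u < (points.length : Int) → 0 ≤ v →
        v < (points.length : Int) → u ≠ v → pvDist points u v ≤ m := by
      have hkey : ∀ u v : Int, 0 ≤ u → u < v → v < (points.length : Int) →
          pvDist points u v ≤ m := by
        intro u v h1 h2 h3
        exact hbound (pvDist points u v) (by
          refine List.mem_map.mpr ⟨(pvDist points u v, u, v), ?_, rfl⟩
          rw [PySem.List.mem_sorted]
          exact (mem_pvDistances _ _ _).mpr ⟨h1, h2, h3, rfl⟩)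
      intro u v h1 h2 h3 h4 h5
      rcases lt_trichotomy u v with h | h | h
      · exact hkey u v h1 h h4
      · exact absurd h h5
      · rw [pvDist_comm]
        exact hkey v u h3 h h2
    rw [hA, hmax]
    have hgd : (Option.getD (some m) 0 : Int) = m := rfl
    rw [hgd]
    have h0m : (0 : Int) ≤ pvDist points 0 1 := pvDist_nonneg points 0 1
    have hm0 : 0 ≤ m := le_trans h0m (hbound _ hmemmap)
    refine pvBin_spec points (m + 1).toNat 0 (m + 1) 0 (by omega) rfl (Or.inl rfl) ?_
    intro e he
    apply pvNotBip_all points e hn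
    intro u v h1 h2 h3 h4 h5
    have := hall u v h1 h2 h3 h4 h5
    omega

-- ===== B-side correctness =====
theorem pvScan_spec (points : List (List Int)) (hn3 : 3 ≤ points.length)
    (edges : List (Int × Int × Int))
    (hperm : edges.Perm (pvDistances points (points.length : Int)))
    (hsort : edges.Pairwise (fun a b => a.1 ≤ b.1)) :
    ∀ (rest pr : List (Int × Int × Int)) (cp sd : List Int),
      edges = pr ++ rest → pvInvB points cp sd pr →
      pvBip points (pvScan (points.length : Int) cp sd rest) ∧
      ¬ pvBip points (pvScan (points.length : Int) cp sd rest + 1) := by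
  have hL3 : (3 : Int) ≤ (points.length : Int) := by exact_mod_cast hn3
  intro rest
  induction rest with
  | nil =>
    intro pr cp sd hdec hinv
    obtain ⟨hl1, hl2, hsd01, hJ2, hJ3⟩ := hinv
    exfalso
    have hmem : ∀ a b : Int, 0 ≤ a → a < b → b < (points.length : Int) →
        (pvDist points a b, a, b) ∈ pr := by
      intro a b ha hab hb
      have h1 : (pvDist points a b, a, b) ∈ pvDistances points (points.length : Int) :=
        (mem_pvDistances _ _ _).mpr ⟨ha, hab, hb, rfl⟩
      have h2 := hperm.mem_iff.mpr h1
      rwa [hdec, List.append_nil] at h2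
    have h01 := (hJ2 _ _ _ (hmem 0 1 (by omega) (by omega) (by omega))).2
    have h02 := (hJ2 _ _ _ (hmem 0 2 (by omega) (by omega) (by omega))).2
    have h12 := (hJ2 _ _ _ (hmem 1 2 (by omega) (by omega) (by omega))).2
    have s0 := hsd01 0 (by omega) (by omega)
    have s1 := hsd01 1 (by omega) (by omega)
    have s2 := hsd01 2 (by omega) (by omega)
    omega
  | cons cur rest' ih =>
    obtain ⟨d, i, j⟩ := cur
    intro pr cp sd hdec hinv
    obtain ⟨hl1, hl2, hsd01, hJ2, hJ3⟩ := hinv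
    have hcur : (d, i, j) ∈ edges := by rw [hdec]; simp
    have hfacts := (mem_pvDistances points _ _).mp (hperm.mem_iff.mp hcur)
    dsimp only at hfacts
    obtain ⟨hi0, hij, hjL, hdval⟩ := hfacts
    have hedge_facts : ∀ e ∈ edges, 0 ≤ e.2.1 ∧ e.2.1 < e.2.2 ∧ e.2.2 < (points.length : Int) ∧
        e.1 = pvDist points e.2.1 e.2.2 := by
      intro e he
      exact (mem_pvDistances points _ _).mp (hperm.mem_iff.mp he)
    have hsort' := hsort
    rw [hdec] at hsort'
    obtain ⟨hpr_pw, hcr_pw, hcross⟩ := List.pairwise_append.mp hsort'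
    have hpr_le : ∀ e ∈ pr, e.1 ≤ d := fun e he => hcross e he (d, i, j) (by simp)
    have hrest_ge : ∀ e ∈ rest', d ≤ e.1 := (List.pairwise_cons.mp hcr_pw).1
    simp only [pvScan, ← pvAt_def]
    split_ifs with hne hsde
    -- merge branch
    · have hti : pvAt cp i ≠ pvAt cp j := hne
      obtain ⟨hr1, hr2, hr3⟩ := pvRelabel_spec (pvAt cp i) (pvAt cp j)
        (PySem.Int.bxor (PySem.Int.bxor (pvAt sd i) (pvAt sd j)) 1)
        (PySem.List.pyRange 0 (points.length : Int) 1) cp sd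
        (PySem.List.nodup_pyRange_one _ _)
        (by
          intro k hk
          rw [PySem.List.mem_pyRange_one] at hk
          refine ⟨hk.1, by rw [hl1]; omega, by rw [hl2]; omega⟩)
      have hA : ∀ m : Int, 0 ≤ m → m < (points.length : Int) →
          (pvAt (pvRelabel (pvAt cp i) (pvAt cp j)
              (PySem.Int.bxor (PySem.Int.bxor (pvAt sd i) (pvAt sd j)) 1) cp sd
              (PySem.List.pyRange 0 (points.length : Int) 1)).1 m =
            if pvAt cp m = pvAt cp j then pvAt cp i else pvAt cp m) ∧
          (pvAt (pvRelabel (pvAt cp i) (pvAt cp j)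
              (PySem.Int.bxor (PySem.Int.bxor (pvAt sd i) (pvAt sd j)) 1) cp sd
              (PySem.List.pyRange 0 (points.length : Int) 1)).2 m =
            if pvAt cp m = pvAt cp j then
              PySem.Int.bxor (pvAt sd m) (PySem.Int.bxor (PySem.Int.bxor (pvAt sd i) (pvAt sd j)) 1)
            else pvAt sd m) := by
        intro m h0 h1
        have hmem : m ∈ PySem.List.pyRange 0 (points.length : Int) 1 :=
          PySem.List.mem_pyRange_one.mpr ⟨h0, h1⟩
        obtain ⟨a, b⟩ := hr3 m h0
        constructor
        · rw [a]
          by_cases hc : pvAt cp m = pvAt cp j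
          · rw [if_pos ⟨hmem, hc⟩, if_pos hc]
          · rw [if_neg (fun h => hc h.2), if_neg hc]
        · rw [b]
          by_cases hc : pvAt cp m = pvAt cp j
          · rw [if_pos ⟨hmem, hc⟩, if_pos hc]
          · rw [if_neg (fun h => hc h.2), if_neg hc]
      have hf01 : PySem.Int.bxor (PySem.Int.bxor (pvAt sd i) (pvAt sd j)) 1 = 0 ∨
          PySem.Int.bxor (PySem.Int.bxor (pvAt sd i) (pvAt sd j)) 1 = 1 :=
        pvBxor01 (pvBxor01 (hsd01 i hi0 (by omega)) (hsd01 j (by omega) hjL)) (Or.inr rfl)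
      apply ih (pr ++ [(d, i, j)])
      · rw [hdec, List.append_assoc]; rfl
      · refine ⟨by rw [hr1, hl1], by rw [hr2, hl2], ?_, ?_, ?_⟩
        · intro k h0 h1
          rw [(hA k h0 h1).2]
          split_ifs
          · exact pvBxor01 (hsd01 k h0 h1) hf01
          · exact hsd01 k h0 h1
        · intro d' u v hmem'
          rcases List.mem_append.mp hmem' with hold | hnew
          · obtain ⟨hcuv, hsuv⟩ := hJ2 _ _ _ hold
            have hbd := hedge_facts _ (by rw [hdec]; exact List.mem_append_left _ hold)
            dsimp only at hbd
            obtain ⟨hu0, huv, hvL, _⟩ := hbd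
            rw [(hA u hu0 (by omega)).1, (hA v (by omega) hvL).1,
                (hA u hu0 (by omega)).2, (hA v (by omega) hvL).2]
            by_cases hcu : pvAt cp u = pvAt cp j
            · rw [if_pos hcu, if_pos (by rw [← hcuv]; exact hcu), if_pos hcu,
                  if_pos (by rw [← hcuv]; exact hcu)]
              exact ⟨rfl, pvBxor_cancel_ne (hsd01 u hu0 (by omega)) (hsd01 v (by omega) hvL) hf01 hsuv⟩
            · rw [if_neg hcu, if_neg (by rw [← hcuv]; exact hcu), if_neg hcu,
                  if_neg (by rw [← hcuv]; exact hcu)]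
              exact ⟨hcuv, hsuv⟩
          · rw [List.mem_singleton] at hnew
            cases hnew
            rw [(hA i hi0 (by omega)).1, (hA j (by omega) hjL).1,
                (hA i hi0 (by omega)).2, (hA j (by omega) hjL).2]
            rw [if_neg hti, if_pos rfl, if_neg hti, if_pos rfl]
            exact ⟨rfl, pvSideNew (hsd01 i hi0 (by omega)) (hsd01 j (by omega) hjL)⟩
        · intro u v hu0 huL hv0 hvL hcc
          have hmono : ∀ e ∈ pr, e ∈ pr ++ [(d, i, j)] := fun e he => List.mem_append_left _ he
          rw [(hA u hu0 huL).1, (hA v hv0 hvL).1] at hcc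
          rw [(hA u hu0 huL).2, (hA v hv0 hvL).2]
          have hELji : pvEL (pr ++ [(d, i, j)]) j i := Or.inr ⟨d, by simp⟩
          by_cases pu : pvAt cp u = pvAt cp j <;> by_cases pv : pvAt cp v = pvAt cp j
          · rw [if_pos pu, if_pos pv]
            rw [if_pos pu, if_pos pv] at hcc
            rw [pvParityFlip (hsd01 u hu0 huL) (hsd01 v hv0 hvL) hf01]
            exact pvWalk_mono (pvEL_mono hmono) (hJ3 u v hu0 huL hv0 hvL (by rw [pu, pv]))
          · -- u in j-class, v in i-class
            rw [if_pos pu, if_neg pv] at hcc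
            rw [if_pos pu, if_neg pv]
            have W1 : pvWalk (pvEL pr) u j (decide (pvAt sd u ≠ pvAt sd j)) :=
              hJ3 u j hu0 huL (by omega) hjL pu
            have W2 : pvWalk (pvEL pr) i v (decide (pvAt sd i ≠ pvAt sd v)) :=
              hJ3 i v hi0 (by omega) hv0 hvL (by rw [← hcc])
            have Wedge : pvWalk (pvEL (pr ++ [(d, i, j)])) j i (!false) :=
              pvWalk.cons hELji (pvWalk.nil i)
            have W := pvWalk_append (pvWalk_append (pvWalk_mono (pvEL_mono hmono) W1) Wedge)
              (pvWalk_mono (pvEL_mono hmono) W2)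
            simp only [Bool.not_false] at W
            rwa [pvParityCross (hsd01 u hu0 huL) (hsd01 j (by omega) hjL)
              (hsd01 i hi0 (by omega)) (hsd01 v hv0 hvL)] at W
          · -- v in j-class, u in i-class
            rw [if_neg pu, if_pos pv] at hcc
            rw [if_neg pu, if_pos pv]
            have W1 : pvWalk (pvEL pr) v j (decide (pvAt sd v ≠ pvAt sd j)) :=
              hJ3 v j hv0 hvL (by omega) hjL pv
            have W2 : pvWalk (pvEL pr) i u (decide (pvAt sd i ≠ pvAt sd u)) :=
              hJ3 i u hi0 (by omega) hu0 huL (by rw [hcc])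
            have Wedge : pvWalk (pvEL (pr ++ [(d, i, j)])) j i (!false) :=
              pvWalk.cons hELji (pvWalk.nil i)
            have W := pvWalk_append (pvWalk_append (pvWalk_mono (pvEL_mono hmono) W1) Wedge)
              (pvWalk_mono (pvEL_mono hmono) W2)
            simp only [Bool.not_false] at W
            rw [pvParityCross (hsd01 v hv0 hvL) (hsd01 j (by omega) hjL)
              (hsd01 i hi0 (by omega)) (hsd01 u hu0 huL)] at W
            have W' := pvWalk_symm (pvEL_symm _) W
            rwa [pvDecide_ne_comm] at W'
          · rw [if_neg pu, if_neg pv] at hcc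
            rw [if_neg pu, if_neg pv]
            exact pvWalk_mono (pvEL_mono hmono) (hJ3 u v hu0 huL hv0 hvL hcc)
    -- conflict branch: return d
    · have hceq : pvAt cp i = pvAt cp j := by omega
      constructor
      · refine ⟨fun u => decide (pvAt sd u = 1), ?_⟩
        have key : ∀ u v : Int, 0 ≤ u → u < v → v < (points.length : Int) →
            pvDist points u v < d → decide (pvAt sd u = 1) ≠ decide (pvAt sd v = 1) := by
          intro u v hu0 huv hvL hdist
          have h1 : (pvDist points u v, u, v) ∈ pr ++ (d, i, j) :: rest' := by
            rw [← hdec]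
            exact hperm.mem_iff.mpr ((mem_pvDistances _ _ _).mpr ⟨hu0, huv, hvL, rfl⟩)
          rcases List.mem_append.mp h1 with hold | hnew
          · exact pvSideColor (hsd01 u hu0 (by omega)) (hsd01 v (by omega) hvL)
              ((hJ2 _ _ _ hold).2)
          · rcases List.mem_cons.mp hnew with heq | hrest
            · exfalso
              have := (Prod.mk.injEq _ _ _ _).mp heq
              omega
            · exfalso
              have := hrest_ge _ hrest
              dsimp only at this
              omega
        intro u v hE
        obtain ⟨hu0, huL, hv0, hvL, huv, hdist⟩ := hE
        rcases lt_trichotomy u v with h | h | h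
        · exact key u v hu0 h hvL hdist
        · exact absurd h huv
        · exact (key v u hv0 h huL (by rwa [pvDist_comm])).symm
      · rintro ⟨c, hc⟩
        have hsd' : pvAt sd i = pvAt sd j := hsde
        have W : pvWalk (pvEL pr) i j false := by
          have := hJ3 i j hi0 (by omega) (by omega) hjL hceq
          rwa [show decide (pvAt sd i ≠ pvAt sd j) = false by simp [hsd']] at this
        have hlift : ∀ u v : Int, pvEL pr u v → pvE points (d + 1) u v := by
          intro u v huv
          have main : ∀ a b d' : Int, (d', a, b) ∈ pr → pvE points (d + 1) a b := by
            intro a b d' hm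
            have hbd := hedge_facts _ (by rw [hdec]; exact List.mem_append_left _ hm)
            dsimp only at hbd
            have hle := hpr_le _ hm
            dsimp only at hle
            exact ⟨hbd.1, by omega, by omega, hbd.2.2.1, by omega, by omega⟩
          rcases huv with ⟨d', hm⟩ | ⟨d', hm⟩
          · exact main u v d' hm
          · exact pvE_symm _ _ _ _ (main v u d' hm)
        have Wlift : pvWalk (pvE points (d + 1)) i j false := pvWalk_mono hlift W
        have hedge : pvE points (d + 1) j i :=
          ⟨by omega, hjL, hi0, by omega, by omega, by rw [pvDist_comm]; omega⟩
        have closed := pvWalk_append Wlift (pvWalk.cons hedge (pvWalk.nil i))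
        rw [show xor false (!false) = true by decide] at closed
        exact pvNoOddClosed hc closed
    -- consistent edge: recurse
    · have hceq : pvAt cp i = pvAt cp j := by omega
      apply ih (pr ++ [(d, i, j)])
      · rw [hdec, List.append_assoc]; rfl
      · refine ⟨hl1, hl2, hsd01, ?_, ?_⟩
        · intro d' u v hmem'
          rcases List.mem_append.mp hmem' with hold | hnew
          · exact hJ2 _ _ _ hold
          · rw [List.mem_singleton] at hnew
            cases hnew
            exact ⟨hceq, hsde⟩
        · intro u v hu0 huL hv0 hvL hcc
          exact pvWalk_mono (pvEL_mono (fun e he => List.mem_append_left _ he))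
            (hJ3 u v hu0 huL hv0 hvL hcc)

theorem pvB_char (points : List (List Int)) (hn : 3 ≤ points.length) :
    pvBip points (maxPartitionFactor_alt points) ∧
      ¬ pvBip points (maxPartitionFactor_alt points + 1) := by
  have hL3 : (3 : Int) ≤ (points.length : Int) := by exact_mod_cast hn
  have hL2 : ((points.length : Int)) ≠ 2 := by omega
  have halt : maxPartitionFactor_alt points =
      pvScan (points.length : Int) (PySem.List.pyRange 0 (points.length : Int) 1)
        (PySem.List.pyRepeat [0] (points.length : Int))
        (PySem.List.sorted (pvDistances points (points.length : Int)) (fun e => e.1) false) := by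
    simp only [maxPartitionFactor_alt]
    rw [if_neg hL2]
  rw [halt]
  apply pvScan_spec points hn
    (PySem.List.sorted (pvDistances points (points.length : Int)) (fun e => e.1) false)
    (PySem.List.sorted_perm _ _ _)
    (PySem.List.sorted_pairwise _ _) _ []
  · simp
  · refine ⟨?_, ?_, ?_, ?_, ?_⟩
    · rw [PySem.List.length_pyRange_one]; omega
    · rw [PySem.List.pyRepeat_singleton, List.length_replicate]; omega
    · intro k h0 h1
      rw [pvAt_repeat _ _ _ h0 h1]
      exact Or.inl rfl
    · intro d' u v hm
      simp at hm
    · intro u v hu0 huL hv0 hvL hcc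
      rw [pvAt_pyRange _ _ hu0 huL, pvAt_pyRange _ _ hv0 hvL] at hcc
      subst hcc
      rw [show decide (pvAt (PySem.List.pyRepeat [0] (points.length : Int)) u ≠
        pvAt (PySem.List.pyRepeat [0] (points.length : Int)) u) = false by simp]
      exact pvWalk.nil u

-- ===== VERDICT (by name: the statement is the Claim_ definition above) =====
theorem maxPartitionFactor_spec : Claim_equal_maxPartitionFactor := by
  intro points _ hpre
  unfold Spec_maxPartitionFactor
  by_cases h2 : (points.length : Int) = 2
  · simp [maxPartitionFactor, maxPartitionFactor_alt, h2]
  · have hn : 3 ≤ points.length := by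
      have := hpre.1
      omega
    obtain ⟨ha1, ha2⟩ := pvA_char points hn
    obtain ⟨hb1, hb2⟩ := pvB_char points hn
    rcases lt_trichotomy (maxPartitionFactor points) (maxPartitionFactor_alt points) with h | h | h
    · exact absurd hb1 (ha2 _ h)
    · exact h
    · exact absurd ha1 (fun ha => hb2 (pvBip_antitone points (by omega) ha))
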